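-- pv_equiv track=rewrite | github.com/Ankit1017/Hatched-Studio | main_app/services/pptx_export/text_utils.py | trim_code_for_slide
-- ===== SOURCE A (Python) =====
-- def split_line_for_slide(*, line: str, max_chars: int) -> list[str]:
--     if len(line) <= max_chars:
--         return [line]
--     wrapped: list[str] = []
--     remaining = line
--     while len(remaining) > max_chars:
--         split_at = max_chars
--         split_candidates = [
--             remaining.rfind(token, 0, max_chars)
--             for token in (" ", ",", ")", "(", ".", ";", "=")
--         ]
--         best_candidate = max(split_candidates)
--         if best_candidate >= max_chars // 2:
--             split_at = best_candidate + 1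
--         wrapped.append(remaining[:split_at].rstrip() + " \\")
--         remaining = "  " + remaining[split_at:].lstrip()
--     wrapped.append(remaining)
--     return wrapped
--
-- def trim_code_for_slide(code_snippet: str) -> list[str]:
--     lines = [line.rstrip().replace("\t", "    ") for line in str(code_snippet).splitlines()]
--     while lines and not lines[0].strip():
--         lines.pop(0)
--     while lines and not lines[-1].strip():
--         lines.pop()
--
--     trimmed: list[str] = []
--     max_lines = 22
--     max_chars = 78
--     truncated = False
--     for line in lines:
--         segments = split_line_for_slide(line=line, max_chars=max_chars)
--         for segment in segments:
--             if len(trimmed) >= max_lines: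
--                 truncated = True
--                 break
--             trimmed.append(segment)
--         if truncated:
--             break
--     if truncated and trimmed:
--         trimmed[-1] = (trimmed[-1][: max_chars - 3] + "...") if len(trimmed[-1]) > max_chars - 3 else (trimmed[-1] + "...")
--     return trimmed or ["# code snippet unavailable"]
-- ===== SOURCE B (Python) =====
-- _BREAKS = " ,)(.;="
--
--
-- def _break_at(rem: str) -> int:
--     """Rightmost index < 78 holding a break character, else -1 (one reverse scan)."""
--     for k, c in enumerate(reversed(rem[:78])):
--         if c in _BREAKS:
--             return 77 - k
--     return -1
--
--
-- def _wrap(rem: str) -> list[str]: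
--     if len(rem) <= 78:
--         return [rem]
--     j = _break_at(rem)
--     cut = j + 1 if j >= 39 else 78
--     return [rem[:cut].rstrip() + " \\"] + _wrap("  " + rem[cut:].lstrip())
--
--
-- def _first_content(lines: list[str]) -> list[str]:
--     """Suffix of `lines` starting at the first non-blank line ([] if none)."""
--     for i, line in enumerate(lines):
--         if line.strip():
--             return lines[i:]
--     return []
--
--
-- def trim_code_for_slide(code_snippet: str) -> list[str]:
--     raw = [line.rstrip().replace("\t", "    ") for line in str(code_snippet).splitlines()]
--     lines = _first_content(_first_content(raw)[::-1])[::-1]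
--     segs = [seg for line in lines for seg in _wrap(line)]
--     out = segs[:22]
--     if len(segs) > 22:
--         out[-1] = (out[-1][:75] if len(out[-1]) > 75 else out[-1]) + "..."
--     return out or ["# code snippet unavailable"]
-- ===== Notes on version B (the rewrite author's own statement) =====
-- stated objective: alternative
-- what changed: B finds each wrap split point with one right-to-left membership scan of the 78-char prefix instead of A's seven substring rfind calls plus a max, wraps with a single recursive function instead of a guard plus while loop, trims blank edge lines by find-first-nonblank-and-slice (applied forwards and on the reversal) instead of two destructive pop loops, and truncates by flattening all segments, slicing to 22 and comparing lengths instead of A's stateful early-break accumulation loop.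
import Mathlib
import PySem

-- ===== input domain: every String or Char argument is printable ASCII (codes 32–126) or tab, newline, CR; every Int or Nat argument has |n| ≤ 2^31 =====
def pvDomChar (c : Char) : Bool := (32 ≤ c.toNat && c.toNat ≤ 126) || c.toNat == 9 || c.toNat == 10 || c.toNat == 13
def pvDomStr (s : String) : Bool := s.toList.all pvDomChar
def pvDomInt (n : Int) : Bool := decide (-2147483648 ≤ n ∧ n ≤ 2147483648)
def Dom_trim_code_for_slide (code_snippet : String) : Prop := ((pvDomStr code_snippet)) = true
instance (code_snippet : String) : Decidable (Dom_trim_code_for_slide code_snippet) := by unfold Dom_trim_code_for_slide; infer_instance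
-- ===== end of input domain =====

-- B re-implements the slide trimming with a different decomposition: the wrap split point is
-- found by ONE reverse membership scan of the 78-char prefix (instead of seven substring rfinds
-- plus a max), the wrap is one recursive function (instead of a guard + while loop), the blank
-- edge lines are removed by find-first-nonblank-and-slice (instead of two destructive pop loops),
-- and truncation is flatten-all-segments / take 22 / length test (instead of a stateful
-- early-break accumulation loop). Return-value equivalence only; neither program mutates state.

-- line.rstrip().replace("\t", "    ") over splitlines, on code points
-- (this normalization line is textually identical in Source A and Source B, so the helper is shared)
def pvPrep (s : String) : List (List Char) :=
  (PySem.Str.splitlines s).map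
    (fun line => PySem.Chars.replace (PySem.Chars.rstrip line.toList) ['\t'] [' ', ' ', ' ', ' '])

-- ===== PORT A =====

-- split_at of one wrap step: max of the seven rfind(token, 0, 78), bumped to best+1 when ≥ 39
def pvSplitAt (remaining : List Char) : Int :=
  let split_candidates :=
    [' ', ',', ')', '(', '.', ';', '='].map
      (fun token => PySem.Chars.rfindFrom remaining [token] 0 (some 78))
  -- split_candidates is a literal 7-element list, so max? is always `some`; the default is dead
  let best_candidate := (PySem.List.max? split_candidates id).getD 0
  if best_candidate ≥ 39 then best_candidate + 1 else 78

theorem pvSplitAt_ge (remaining : List Char) : 40 ≤ pvSplitAt remaining := by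
  have h : ∀ b : Int, 40 ≤ (if b ≥ 39 then b + 1 else 78) := by
    intro b; split_ifs with hb <;> omega
  exact h _

-- the `while len(remaining) > max_chars` loop of split_line_for_slide
def pvWrap (remaining : List Char) : List (List Char) :=
  if _h : 78 < remaining.length then
    (PySem.Chars.rstrip (PySem.List.slice remaining none (some (pvSplitAt remaining))) ++ [' ', '\\'])
      :: pvWrap ([' ', ' '] ++ PySem.Chars.lstrip (PySem.List.slice remaining (some (pvSplitAt remaining)) none))
  else [remaining]
termination_by remaining.length
decreasing_by
  have h40 := pvSplitAt_ge remaining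
  rw [PySem.List.slice_from remaining (by omega)]
  have hle : (PySem.Chars.lstrip (remaining.drop (pvSplitAt remaining).toNat)).length
      ≤ (remaining.drop (pvSplitAt remaining).toNat).length := by
    unfold PySem.Chars.lstrip; exact List.length_dropWhile_le _ _
  have hd : (remaining.drop (pvSplitAt remaining).toNat).length
      = remaining.length - (pvSplitAt remaining).toNat := List.length_drop
  have h40' : 40 ≤ (pvSplitAt remaining).toNat := by omega
  simp only [List.length_append, List.length_cons, List.length_nil]
  omega

def pvSplitLineForSlide (line : List Char) : List (List Char) :=
  if line.length ≤ 78 then [line] else pvWrap line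

-- trimmed[-1] = trimmed[-1][:75] + "..." if len(trimmed[-1]) > 75 else trimmed[-1] + "..."
def pvEllipsize (trimmed : List (List Char)) : List (List Char) :=
  match trimmed.getLast? with
  | none => trimmed
  | some last =>
      trimmed.dropLast ++
        [if 75 < last.length then PySem.List.slice last none (some 75) ++ ['.', '.', '.']
         else last ++ ['.', '.', '.']]

-- while lines and not lines[0].strip(): lines.pop(0)
def pvDropFrontA : List (List Char) → List (List Char)
  | [] => []
  | l :: rest => if PySem.Chars.strip l = [] then pvDropFrontA rest else l :: rest

-- while lines and not lines[-1].strip(): lines.pop()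
def pvDropBackA (ls : List (List Char)) : List (List Char) :=
  if hne : ls = [] then ls
  else if PySem.Chars.strip (ls.getLast hne) = [] then pvDropBackA ls.dropLast
  else ls
termination_by ls.length
decreasing_by
  have : 0 < ls.length := List.length_pos_iff.mpr hne
  simp [List.length_dropLast]; omega

-- the inner `for segment in segments` loop with its break flag
def pvInnerA : List (List Char) → List (List Char) → List (List Char) × Bool
  | [], acc => (acc, false)
  | seg :: rest, acc => if 22 ≤ acc.length then (acc, true) else pvInnerA rest (acc ++ [seg])

-- the outer `for line in lines` loop, stopping when truncated
def pvOuterA : List (List Char) → List (List Char) → List (List Char) × Bool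
  | [], acc => (acc, false)
  | line :: rest, acc =>
      match pvInnerA (pvSplitLineForSlide line) acc with
      | (acc', false) => pvOuterA rest acc'
      | (acc', true) => (acc', true)

def trim_code_for_slide (code_snippet : String) : List String :=
  let lines := pvDropBackA (pvDropFrontA (pvPrep code_snippet))
  let res := pvOuterA lines []
  let trimmed := if res.2 && !res.1.isEmpty then pvEllipsize res.1 else res.1
  if trimmed.isEmpty then ["# code snippet unavailable"] else trimmed.map String.ofList

-- ===== PORT B =====

-- c in " ,)(.;="
def pvIsBreak (c : Char) : Bool :=
  PySem.Chars.isIn [c] [' ', ',', ')', '(', '.', ';', '=']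

-- the `for k, c in enumerate(reversed(rem[:78]))` loop of _break_at
def pvBreakGo : List (Int × Char) → Int
  | [] => -1
  | (k, c) :: rest => if pvIsBreak c then 77 - k else pvBreakGo rest

-- _break_at: rightmost index < 78 holding a break character, else -1 (one reverse scan)
def pvBreakAt (rem : List Char) : Int :=
  pvBreakGo (PySem.List.enumerate (PySem.List.slice rem none (some 78)).reverse 0)

-- cut = j + 1 if j >= 39 else 78  with j = _break_at(rem)
def pvCutB (rem : List Char) : Int :=
  if pvBreakAt rem ≥ 39 then pvBreakAt rem + 1 else 78

theorem pvCutB_ge (rem : List Char) : 40 ≤ pvCutB rem := by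
  unfold pvCutB; split_ifs with hb <;> omega

-- _wrap: one recursive function handling both the short-line base case and one split step
def pvWrapB (rem : List Char) : List (List Char) :=
  if rem.length ≤ 78 then [rem]
  else
    [PySem.Chars.rstrip (PySem.List.slice rem none (some (pvCutB rem))) ++ [' ', '\\']] ++
      pvWrapB ([' ', ' '] ++ PySem.Chars.lstrip (PySem.List.slice rem (some (pvCutB rem)) none))
termination_by rem.length
decreasing_by
  have h40 := pvCutB_ge rem
  rw [PySem.List.slice_from rem (by omega)]
  have hle : (PySem.Chars.lstrip (rem.drop (pvCutB rem).toNat)).length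
      ≤ (rem.drop (pvCutB rem).toNat).length := by
    unfold PySem.Chars.lstrip; exact List.length_dropWhile_le _ _
  have hd : (rem.drop (pvCutB rem).toNat).length
      = rem.length - (pvCutB rem).toNat := List.length_drop
  have h40' : 40 ≤ (pvCutB rem).toNat := by omega
  simp only [List.length_append, List.length_cons, List.length_nil]
  omega

-- _first_content: for i, line in enumerate(lines): if line.strip(): return lines[i:] ; return []
def pvFirstContentGo (ls : List (List Char)) : List (Int × List Char) → List (List Char)
  | [] => []
  | (i, l) :: rest =>
      if PySem.Chars.strip l = [] then pvFirstContentGo ls rest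
      else PySem.List.slice ls (some i) none

def pvFirstContent (ls : List (List Char)) : List (List Char) :=
  pvFirstContentGo ls (PySem.List.enumerate ls 0)

-- out[-1] = (out[-1][:75] if len(out[-1]) > 75 else out[-1]) + "..."  as a map on the last element
def pvLastMap (f : List Char → List Char) : List (List Char) → List (List Char)
  | [] => []
  | [x] => [f x]
  | x :: y :: rest => x :: pvLastMap f (y :: rest)

def pvEllipsizeB (out : List (List Char)) : List (List Char) :=
  pvLastMap (fun last =>
    (if 75 < last.length then PySem.List.slice last none (some 75) else last) ++ ['.', '.', '.']) out

def trim_code_for_slide_alt (code_snippet : String) : List String :=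
  let raw := pvPrep code_snippet
  -- lines[::-1] is List.reverse (PySem.List.slice?_none_none_neg_one)
  let lines := (pvFirstContent (pvFirstContent raw).reverse).reverse
  let segs := (lines.map pvWrapB).flatten
  let out := PySem.List.slice segs none (some 22)
  let out := if 22 < segs.length then pvEllipsizeB out else out
  if out.isEmpty then ["# code snippet unavailable"] else out.map String.ofList

-- ===== PRECONDITION & SPEC =====
def Spec_trim_code_for_slide (code_snippet : String) (out : List String) : Prop := out = trim_code_for_slide_alt code_snippet
instance (code_snippet : String) (out : List String) : Decidable (Spec_trim_code_for_slide code_snippet out) := by unfold Spec_trim_code_for_slide; infer_instance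

-- ===== CLAIM (what is proved, stated in full; the proofs are below) =====
def Claim_equal_trim_code_for_slide : Prop := ∀ (code_snippet : String), Dom_trim_code_for_slide code_snippet → Spec_trim_code_for_slide code_snippet (trim_code_for_slide code_snippet)

-- ===== LEMMAS AND PROOFS =====

-- the rightmost index ≤ x of `pre` whose character satisfies P, else -1 (proof-side spec
-- both the A-side max-of-rfinds and the B-side reverse scan are reduced to)
def pvLastIdx (P : Char → Bool) (pre : List Char) : Nat → Int
  | 0 => if (pre[0]?).any P then 0 else -1
  | x + 1 => if (pre[x + 1]?).any P then ((x : Int) + 1) else pvLastIdx P pre x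

theorem pvLastIdx_neg_one_le (P : Char → Bool) (pre : List Char) (x : Nat) :
    -1 ≤ pvLastIdx P pre x := by
  induction x with
  | zero => unfold pvLastIdx; split_ifs <;> omega
  | succ x ih => unfold pvLastIdx; split_ifs <;> omega

theorem pvLastIdx_le (P : Char → Bool) (pre : List Char) (x : Nat) :
    pvLastIdx P pre x ≤ x := by
  induction x with
  | zero => unfold pvLastIdx; split_ifs <;> omega
  | succ x ih => unfold pvLastIdx; split_ifs <;> push_cast <;> omega

theorem pvLastIdx_mono {P Q : Char → Bool} (h : ∀ c, P c = true → Q c = true)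
    (pre : List Char) (x : Nat) : pvLastIdx P pre x ≤ pvLastIdx Q pre x := by
  induction x with
  | zero =>
      unfold pvLastIdx
      cases hc : pre[0]? with
      | none => simp
      | some a =>
          simp only [Option.any_some]
          by_cases hp : P a = true
          · simp [hp, h a hp]
          · have := pvLastIdx_neg_one_le Q pre 0
            split_ifs <;> simp_all
  | succ x ih =>
      unfold pvLastIdx
      cases hc : pre[x + 1]? with
      | none => simpa using ih
      | some a =>
          simp only [Option.any_some]
          by_cases hp : P a = true
          · simp [hp, h a hp]
          · have h1 := pvLastIdx_le Q pre x
            have h2 := pvLastIdx_le P pre x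
            split_ifs <;> simp_all <;> omega

theorem pvLastIdx_exists {Q : Char → Bool} (pre : List Char) (x : Nat)
    (h : 0 ≤ pvLastIdx Q pre x) :
    ∃ c, Q c = true ∧ pvLastIdx (fun a => c == a) pre x = pvLastIdx Q pre x := by
  induction x with
  | zero =>
      unfold pvLastIdx at h ⊢
      cases hc : pre[0]? with
      | none => simp [hc] at h
      | some a =>
          by_cases hq : Q a = true
          · exact ⟨a, hq, by simp [hq]⟩
          · simp [hc, hq] at h
  | succ x ih =>
      unfold pvLastIdx at h ⊢
      cases hc : pre[x + 1]? with
      | none =>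
          simp only [hc, Option.any_none, if_neg Bool.false_ne_true] at h ⊢
          exact ih h
      | some a =>
          by_cases hq : Q a = true
          · refine ⟨a, hq, by simp [hq]⟩
          · simp only [hc, Option.any_some, hq, if_neg Bool.false_ne_true] at h ⊢
            obtain ⟨c, hQc, hc'⟩ := ih h
            have hne : (c == a) = false := by
              cases hca : (c == a) with
              | false => rfl
              | true => exact absurd ((beq_iff_eq.mp hca) ▸ hQc) hq
            exact ⟨c, hQc, by simp [hne, hc']⟩

-- [c].isPrefixOf l  tests whether l starts with c
theorem pvIsPrefixOf_singleton (c : Char) (l : List Char) :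
    [c].isPrefixOf l = (l.head?).any (fun a => c == a) := by
  cases l <;> simp [List.isPrefixOf]

-- rfind of a single character = rightmost occurrence ≤ fuel
theorem pvRfindGo_eq (pre : List Char) (c : Char) (x : Nat) :
    PySem.Chars.rfind.go pre [c] x = pvLastIdx (fun a => c == a) pre x := by
  induction x with
  | zero =>
      simp only [PySem.Chars.rfind.go, pvLastIdx, pvIsPrefixOf_singleton,
        ← List.head?_drop (i := 0), List.drop_zero]
  | succ x ih =>
      simp only [PySem.Chars.rfind.go, pvLastIdx, pvIsPrefixOf_singleton, List.head?_drop, ih]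
      split_ifs <;> simp

-- A-side candidate: rfind(token, 0, 78) on a line longer than 78 chars
theorem pvRfindFrom_eval (rem : List Char) (t : Char) (h : 78 < rem.length) :
    PySem.Chars.rfindFrom rem [t] 0 (some 78)
      = pvLastIdx (fun a => t == a) (rem.take 78) 77 := by
  have hn : ¬ ((rem.length : Int) < 78) := by omega
  simp only [PySem.Chars.rfindFrom, hn, if_false]
  norm_num
  have htake : (rem.take 78).length = 78 := by simp; omega
  have h78 : (78 : Int).toNat = 78 := rfl
  rw [h78]
  unfold PySem.Chars.rfind
  rw [htake, pvRfindGo_eq]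
  have hnone : (rem.take 78)[(77 : Nat) + 1]? = none := by
    rw [List.getElem?_eq_none_iff]; omega
  have hstep : ∀ (l : List Char) (P : Char → Bool), l[77 + 1]? = none →
      pvLastIdx P l 78 = pvLastIdx P l 77 := by
    intro l P hl
    show pvLastIdx P l (77 + 1) = _
    rw [pvLastIdx, hl]
    simp
  rw [hstep _ _ hnone]
  have hlb := pvLastIdx_neg_one_le (fun a => t == a) (rem.take 78) 77
  split_ifs with hz <;> omega

-- a break character is one of the seven tokens
theorem pvIsBreak_iff (c : Char) :
    pvIsBreak c = true ↔ c ∈ [' ', ',', ')', '(', '.', ';', '='] := by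
  unfold pvIsBreak
  rw [PySem.Chars.isIn_iff_infix]
  exact List.singleton_infix_iff c _

-- the A-side best candidate equals the rightmost break-character index
theorem pvBest_eq (rem : List Char) (h : 78 < rem.length) :
    ((PySem.List.max? ([' ', ',', ')', '(', '.', ';', '='].map
        (fun token => PySem.Chars.rfindFrom rem [token] 0 (some 78))) id).getD 0)
      = pvLastIdx pvIsBreak (rem.take 78) 77 := by
  set pre := rem.take 78 with hpre
  set m := pvLastIdx pvIsBreak pre 77 with hm
  have hcand : ∀ t : Char, PySem.Chars.rfindFrom rem [t] 0 (some 78)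
      = pvLastIdx (fun a => t == a) pre 77 := fun t => pvRfindFrom_eval rem t h
  have hub : ∀ t : Char, t ∈ [' ', ',', ')', '(', '.', ';', '='] →
      pvLastIdx (fun a => t == a) pre 77 ≤ m := by
    intro t ht
    refine pvLastIdx_mono ?_ pre 77
    intro c hc
    have hct : t = c := beq_iff_eq.mp hc
    exact (pvIsBreak_iff c).mpr (hct ▸ ht)
  cases hmax : PySem.List.max?
      ([' ', ',', ')', '(', '.', ';', '='].map
        (fun token => PySem.Chars.rfindFrom rem [token] 0 (some 78))) id with
  | none =>
      rw [PySem.List.max?_eq_none_iff] at hmax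
      simp at hmax
  | some m' =>
      have hmem := PySem.List.max?_mem hmax
      have hbound := PySem.List.max?_isMax hmax
      obtain ⟨t, ht, hv⟩ := List.mem_map.mp hmem
      rw [hcand t] at hv
      have h1 : m' ≤ m := hv ▸ hub t ht
      have h2 : m ≤ m' := by
        by_cases h0 : 0 ≤ m
        · obtain ⟨c, hQc, hcm⟩ := pvLastIdx_exists pre 77 (hm ▸ h0)
          have hcm' : c ∈ [' ', ',', ')', '(', '.', ';', '='] := (pvIsBreak_iff c).mp hQc
          have hin := List.mem_map_of_mem (f := fun token => PySem.Chars.rfindFrom rem [token] 0 (some 78)) hcm'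
          have hb : PySem.Chars.rfindFrom rem [c] 0 (some 78) ≤ m' := hbound _ hin
          rw [hcand c] at hb
          omega
        · have hsp : (' ' : Char) ∈ [' ', ',', ')', '(', '.', ';', '='] := by simp
          have hin := List.mem_map_of_mem (f := fun token => PySem.Chars.rfindFrom rem [token] 0 (some 78)) hsp
          have hb : PySem.Chars.rfindFrom rem [' '] 0 (some 78) ≤ m' := hbound _ hin
          rw [hcand ' '] at hb
          have hge := pvLastIdx_neg_one_le (fun a => ' ' == a) pre 77
          have hgem := pvLastIdx_neg_one_le pvIsBreak pre 77
          rw [← hm] at hgem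
          omega
      rw [Option.getD_some]
      omega

-- B-side scan over enumerate(reversed(prefix))
theorem pvBreakGo_enum (ys : List Char) (n : Int) :
    pvBreakGo (PySem.List.enumerate ys n)
      = match ys.findIdx? pvIsBreak with
        | some p => 77 - (n + (p : Int))
        | none => -1 := by
  induction ys generalizing n with
  | nil => simp [PySem.List.enumerate, pvBreakGo, List.findIdx?_nil]
  | cons y t ih =>
      rw [PySem.List.enumerate]
      simp only [pvBreakGo, List.findIdx?_cons]
      by_cases hy : pvIsBreak y = true
      · simp [hy]
      · simp only [hy, if_neg Bool.false_ne_true, ih (n + 1)]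
        cases hf : t.findIdx? pvIsBreak with
        | none => simp
        | some p => simp; ring

-- indices below ys.length ignore an appended element
theorem pvLastIdx_append (P : Char → Bool) (ys : List Char) (a : Char) (x : Nat)
    (hx : x < ys.length) : pvLastIdx P (ys ++ [a]) x = pvLastIdx P ys x := by
  induction x with
  | zero =>
      unfold pvLastIdx
      rw [List.getElem?_append_left hx]
  | succ x ih =>
      unfold pvLastIdx
      rw [List.getElem?_append_left hx, ih (by omega)]

-- first break position in the reversal = rightmost break position
theorem pvFindIdxRev (P : Char → Bool) (pre : List Char) (hne : pre ≠ []) :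
    (match pre.reverse.findIdx? P with
      | some p => ((pre.length : Int) - 1 - (p : Int))
      | none => (-1 : Int))
      = pvLastIdx P pre (pre.length - 1) := by
  induction pre using List.reverseRecOn with
  | nil => exact absurd rfl hne
  | append_singleton ys a ih =>
      rw [List.reverse_append, List.reverse_singleton, List.singleton_append,
        List.findIdx?_cons]
      have hget : (ys ++ [a])[ys.length]? = some a := by
        rw [List.getElem?_append_right (le_refl _)]
        simp
      by_cases ha : P a = true
      · rw [if_pos ha]
        have hlen : (ys ++ [a]).length - 1 = ys.length := by simp
        rw [hlen]
        cases hys : ys.length with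
        | zero =>
            rw [hys] at hget
            rw [pvLastIdx, hget]
            simp [ha, hys]
        | succ k =>
            rw [hys] at hget
            rw [pvLastIdx, hget]
            simp [ha, hys]
      · rw [if_neg ha]
        cases hys0 : ys with
        | nil =>
            subst hys0
            simp only [List.reverse_nil, List.findIdx?_nil, Option.map_none]
            unfold pvLastIdx
            simp [ha]
        | cons b t =>
            have hysne : ys ≠ [] := by rw [hys0]; exact List.cons_ne_nil _ _
            rw [← hys0]
            have hpos : 0 < ys.length := List.length_pos_iff.mpr hysne
            have hlen : (ys ++ [a]).length - 1 = ys.length := by simp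
            rw [hlen]
            have hstep : pvLastIdx P (ys ++ [a]) ys.length
                = pvLastIdx P (ys ++ [a]) (ys.length - 1) := by
              obtain ⟨k, hk⟩ : ∃ k, ys.length = k + 1 := ⟨ys.length - 1, by omega⟩
              rw [hk]
              rw [pvLastIdx]
              have hg2 : (ys ++ [a])[k + 1]? = some a := by rw [← hk]; exact hget
              rw [hg2]
              simp [ha]
            rw [hstep, pvLastIdx_append P ys a _ (by omega), ← ih hysne]
            cases hf : ys.reverse.findIdx? P with
            | none => simp
            | some p =>
                have hp : p < ys.length := by
                  have := List.findIdx?_eq_some_iff_getElem.mp hf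
                  simpa using this.1
                simp
                ring

-- the B-side scan equals the rightmost break-character index
theorem pvBreakAt_eq (rem : List Char) (h : 78 < rem.length) :
    pvBreakAt rem = pvLastIdx pvIsBreak (rem.take 78) 77 := by
  unfold pvBreakAt
  rw [PySem.List.slice_to rem (show (0:Int) ≤ 78 by norm_num)]
  have h78 : (78 : Int).toNat = 78 := rfl
  rw [h78, pvBreakGo_enum]
  have hne : rem.take 78 ≠ [] := by
    intro hnil
    have h0 : (rem.take 78).length = 0 := by rw [hnil]; rfl
    rw [List.length_take] at h0
    omega
  have hlen : (rem.take 78).length = 78 := by simp; omega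
  have := pvFindIdxRev pvIsBreak (rem.take 78) hne
  rw [hlen] at this
  rw [← this]
  cases hf : (rem.take 78).reverse.findIdx? pvIsBreak with
  | none => simp
  | some p => simp

-- the candidate search of A reduces to B's cut
theorem pvSplitAt_eval (rem : List Char) (h : 78 < rem.length) :
    pvSplitAt rem = pvCutB rem := by
  unfold pvSplitAt
  show (if ((PySem.List.max? ([' ', ',', ')', '(', '.', ';', '='].map
      (fun token => PySem.Chars.rfindFrom rem [token] 0 (some 78))) id).getD 0) ≥ 39
    then ((PySem.List.max? ([' ', ',', ')', '(', '.', ';', '='].map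
      (fun token => PySem.Chars.rfindFrom rem [token] 0 (some 78))) id).getD 0) + 1
    else 78) = pvCutB rem
  rw [pvBest_eq rem h]
  unfold pvCutB
  rw [pvBreakAt_eq rem h]

-- hence both wrap functions agree
theorem pvWrapB_eq_aux (n : Nat) (rem : List Char) (hn : rem.length ≤ n) :
    pvWrapB rem = pvWrap rem := by
  induction n generalizing rem with
  | zero =>
      rw [pvWrapB, pvWrap]
      have : ¬ 78 < rem.length := by omega
      simp [this, show rem.length ≤ 78 by omega]
  | succ n ih =>
      rw [pvWrapB, pvWrap]
      by_cases h : 78 < rem.length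
      · simp only [show ¬ rem.length ≤ 78 by omega, if_false, dif_pos h,
          ← pvSplitAt_eval rem h, List.singleton_append]
        congr 1
        apply ih
        -- the tail is strictly shorter (same computation as the termination proofs)
        have h40 := pvSplitAt_ge rem
        rw [PySem.List.slice_from rem (by omega)]
        have hle : (PySem.Chars.lstrip (rem.drop (pvSplitAt rem).toNat)).length
            ≤ (rem.drop (pvSplitAt rem).toNat).length := by
          unfold PySem.Chars.lstrip; exact List.length_dropWhile_le _ _
        have hd : (rem.drop (pvSplitAt rem).toNat).length
            = rem.length - (pvSplitAt rem).toNat := List.length_drop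
        have h40' : 40 ≤ (pvSplitAt rem).toNat := by omega
        simp only [List.length_append, List.length_cons, List.length_nil]
        omega
      · simp [h, show rem.length ≤ 78 by omega]

theorem pvWrapB_eq : pvWrapB = pvSplitLineForSlide := by
  funext rem
  rw [pvWrapB_eq_aux rem.length rem (le_refl _)]
  unfold pvSplitLineForSlide
  by_cases h : rem.length ≤ 78
  · rw [pvWrap, if_pos h]
    simp [show ¬ 78 < rem.length by omega]
  · rw [if_neg h]

-- the two last-line "..." adjustments agree
theorem pvEllipsizeB_eq : pvEllipsizeB = pvEllipsize := by
  funext out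
  unfold pvEllipsizeB pvEllipsize
  induction out with
  | nil => rfl
  | cons x rest ih =>
      cases rest with
      | nil =>
          simp only [pvLastMap, List.getLast?_singleton, List.dropLast_singleton,
            List.nil_append]
          split_ifs <;> rfl
      | cons y rest' =>
          simp only [pvLastMap]
          have hl : (x :: y :: rest').getLast? = (y :: rest').getLast? := by
            rw [List.getLast?_cons_cons]
          rw [hl]
          cases hg : (y :: rest').getLast? with
          | none => exact absurd hg (by simp)
          | some last =>
              simp only [hg] at ih ⊢
              rw [List.dropLast_cons_of_ne_nil (List.cons_ne_nil _ _), List.cons_append]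
              split_ifs with h75
              · rw [show pvLastMap (fun last => (if 75 < last.length then PySem.List.slice last none (some 75) else last) ++ ['.', '.', '.']) (y :: rest') = _ from ih]
                simp [h75]
              · rw [show pvLastMap (fun last => (if 75 < last.length then PySem.List.slice last none (some 75) else last) ++ ['.', '.', '.']) (y :: rest') = _ from ih]
                simp [h75]

def pvBlank : List Char → Bool := fun l => decide (PySem.Chars.strip l = [])

theorem pvDropFrontA_eq (ls : List (List Char)) :
    pvDropFrontA ls = ls.dropWhile pvBlank := by
  induction ls with
  | nil => rfl
  | cons l rest ih =>
      simp only [pvDropFrontA, List.dropWhile, pvBlank]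
      split_ifs with h <;> simp [h, ih]

theorem pvFirstContentGo_eq (pre suf : List (List Char)) :
    pvFirstContentGo (pre ++ suf) (PySem.List.enumerate suf (pre.length : Int))
      = suf.dropWhile pvBlank := by
  induction suf generalizing pre with
  | nil => simp [PySem.List.enumerate, pvFirstContentGo]
  | cons l rest ih =>
      rw [PySem.List.enumerate]
      simp only [pvFirstContentGo]
      by_cases h : PySem.Chars.strip l = []
      · rw [if_pos h]
        have hcast : ((pre.length : Int) + 1) = (((pre ++ [l]).length : Nat) : Int) := by
          simp [List.length_append]
        rw [hcast]
        have h2 := ih (pre := pre ++ [l])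
        rw [List.append_assoc, List.singleton_append] at h2
        rw [h2, List.dropWhile_cons]
        simp [pvBlank, h]
      · rw [if_neg h, PySem.List.slice_from_natCast, List.drop_left, List.dropWhile_cons]
        simp [pvBlank, h]

theorem pvFirstContent_eq (ls : List (List Char)) :
    pvFirstContent ls = ls.dropWhile pvBlank := by
  have := pvFirstContentGo_eq [] ls
  simpa [pvFirstContent] using this

theorem pvDropBackA_eq (ls : List (List Char)) :
    pvDropBackA ls = (ls.reverse.dropWhile pvBlank).reverse := by
  induction ls using List.reverseRecOn with
  | nil => simp [pvDropBackA]
  | append_singleton ys a ih =>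
      rw [pvDropBackA]
      rw [dif_neg (by simp : ¬(ys ++ [a] = []))]
      rw [List.getLast_concat]
      simp only [List.reverse_append, List.reverse_cons, List.reverse_nil, List.nil_append,
        List.singleton_append, List.dropWhile_cons]
      by_cases h : PySem.Chars.strip a = []
      · rw [if_pos h, List.dropLast_concat, ih]
        simp [pvBlank, h]
      · simp [pvBlank, h]

theorem pvInnerA_eq (segs acc : List (List Char)) (hacc : acc.length ≤ 22) :
    pvInnerA segs acc = ((acc ++ segs).take 22, decide (22 < acc.length + segs.length)) := by
  induction segs generalizing acc with
  | nil =>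
      simp [pvInnerA, List.take_of_length_le hacc]
      omega
  | cons seg rest ih =>
      simp only [pvInnerA]
      split_ifs with h
      · have h22 : acc.length = 22 := by omega
        have ht : (acc ++ seg :: rest).take 22 = acc := by
          rw [← h22, List.take_left]
        rw [ht]
        simp only [Prod.mk.injEq, true_and, List.length_cons]
        symm
        simp only [decide_eq_true_eq]
        omega
      · have hsplit : acc ++ seg :: rest = (acc ++ [seg]) ++ rest := by simp
        rw [hsplit, ih (acc ++ [seg]) (by simp; omega)]
        simp only [Prod.mk.injEq, List.length_append, List.length_cons, List.length_nil,
          true_and]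
        rw [decide_eq_decide]
        omega

theorem pvOuterA_eq (lines : List (List Char)) (acc : List (List Char)) (hacc : acc.length ≤ 22) :
    pvOuterA lines acc =
      ((acc ++ (lines.map pvSplitLineForSlide).flatten).take 22,
        decide (22 < acc.length + (lines.map pvSplitLineForSlide).flatten.length)) := by
  induction lines generalizing acc with
  | nil =>
      simp [pvOuterA, List.take_of_length_le hacc]
      omega
  | cons line rest ih =>
      simp only [pvOuterA, List.map_cons, List.flatten_cons]
      rw [pvInnerA_eq _ _ hacc]
      by_cases hf : 22 < acc.length + (pvSplitLineForSlide line).length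
      · simp only [hf, decide_true]
        have hlen : 22 ≤ (acc ++ pvSplitLineForSlide line).length := by simp; omega
        rw [← List.append_assoc, List.take_append_of_le_length hlen]
        simp only [Prod.mk.injEq, true_and]
        symm
        simp only [decide_eq_true_eq, List.length_append]
        omega
      · simp only [hf, decide_false]
        have hle : (acc ++ pvSplitLineForSlide line).length ≤ 22 := by simp; omega
        rw [List.take_of_length_le hle]
        rw [ih _ hle]
        simp only [← List.append_assoc, Prod.mk.injEq, List.length_append, true_and]
        rw [decide_eq_decide]
        omega

theorem pvNorm_eq (ls : List (List Char)) :
    pvDropBackA (pvDropFrontA ls) = (pvFirstContent (pvFirstContent ls).reverse).reverse := by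
  rw [pvDropFrontA_eq, pvDropBackA_eq, pvFirstContent_eq, pvFirstContent_eq]

-- ===== VERDICT (by name: the statement is the Claim_ definition above) =====
theorem trim_code_for_slide_spec : Claim_equal_trim_code_for_slide := by
  intro s _
  unfold Spec_trim_code_for_slide
  simp only [trim_code_for_slide, trim_code_for_slide_alt, pvWrapB_eq, pvEllipsizeB_eq]
  rw [pvNorm_eq]
  generalize (pvFirstContent (pvFirstContent (pvPrep s)).reverse).reverse = lines
  rw [pvOuterA_eq lines [] (by simp)]
  generalize (lines.map pvSplitLineForSlide).flatten = segs
  have hslice : PySem.List.slice segs none (some 22) = segs.take 22 := by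
    rw [PySem.List.slice_to segs (by norm_num)]
    rfl
  by_cases h : 22 < segs.length
  · have hne : (segs.take 22).isEmpty = false := by
      rw [List.isEmpty_eq_false_iff]
      intro hnil
      have h1 : (segs.take 22).length = 0 := by rw [hnil]; rfl
      rw [List.length_take] at h1
      omega
    simp [h, hne, hslice]
  · simp [h, hslice]
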